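-- pv_equiv track=rewrite | github.com/HataroKhanh/HSGKHANH | DETHI/BACGIANG/2122/DOCAO.py | trau
-- ===== SOURCE A (Python) =====
-- def trau(n,m):
-- 	i=10
-- 	a = []
-- 	while i<=n:
-- 		if nt(i) and sum(map(int,str(i)))==m:
-- 			a.append(i)
-- 		i+=1
-- 	return a
--
-- def nt(n):
-- 	if n<=1:return False
-- 	for i in range(2,int(n**0.5)+1):
-- 		if n%i==0:return False
-- 	return True
-- ===== SOURCE B (Python) =====
-- def trau(n, m):
--     # Sieve of multiples up to n, then one pass filtering by arithmetic digit sum.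
--     if n < 10:
--         return []
--     sieve = [True] * (n + 1)
--     p = 2
--     while p * p <= n:
--         for c in range(p * p, n + 1, p):
--             sieve[c] = False
--         p += 1
--     out = []
--     for i in range(10, n + 1):
--         if sieve[i]:
--             s, x = 0, i
--             while x:
--                 s += x % 10
--                 x //= 10
--             if s == m:
--                 out.append(i)
--     return out
-- ===== Notes on version B (the rewrite author's own statement) =====
-- stated objective: faster
-- what changed: Replaces per-number trial division (O(sqrt(i)) per candidate) and string-based digit sums with a single Sieve-of-Eratosthenes-style composite marking pass over [2..n] followed by one filtering pass using an arithmetic (divmod) digit sum.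
import Mathlib
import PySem

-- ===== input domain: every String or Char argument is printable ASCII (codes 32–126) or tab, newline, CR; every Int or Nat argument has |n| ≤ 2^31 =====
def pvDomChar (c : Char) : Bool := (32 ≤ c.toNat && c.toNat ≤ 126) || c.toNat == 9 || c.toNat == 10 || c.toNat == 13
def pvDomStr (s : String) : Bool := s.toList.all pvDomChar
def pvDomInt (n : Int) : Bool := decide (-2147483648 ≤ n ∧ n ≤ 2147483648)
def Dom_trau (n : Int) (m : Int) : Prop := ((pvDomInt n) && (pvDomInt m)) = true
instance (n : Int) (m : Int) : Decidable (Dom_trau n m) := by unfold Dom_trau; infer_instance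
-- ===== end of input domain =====

-- B replaces A's per-candidate trial division and string-based digit sums by one sieve
-- marking pass over [2..n] plus an arithmetic digit sum; objective: faster.

-- ===== PORT A =====
-- helper nt(n): trial division over range(2, int(n**0.5)+1); int(n**0.5) is ported as
-- Nat.sqrt n.toNat, exact for 0 ≤ n ≤ 2^31 (the double sqrt never crosses an integer there;
-- nt is only called with 10 ≤ n).
def ntA (k : Int) : Bool :=
  if k ≤ 1 then false
  else (PySem.List.pyRange 2 ((Nat.sqrt k.toNat : Int) + 1) 1).all
    (fun i => !(PySem.Int.mod k i == 0))

-- sum(map(int, str(i))): at every call site i ≥ 10, so str(i) is pure digits and int(c) = code - 48.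
def digSumA (k : Int) : Int :=
  ((PySem.Int.toChars k).map (fun c => ((c.toNat : Int) - 48))).sum

-- 'i = 10; while i <= n: … ; i += 1' is the fold over range(10, n+1).
def trau (n : Int) (m : Int) : List Int :=
  (PySem.List.pyRange 10 (n + 1) 1).foldl
    (fun a i => if ntA i && (digSumA i == m) then a ++ [i] else a) []

-- ===== PORT B =====
-- inner 'for c in range(p*p, n+1, p): sieve[c] = False' (every c ≥ 4, so c.toNat is exact)
def markMultiples (N p : Int) (arr : Array Bool) : Array Bool :=
  (PySem.List.pyRange (p * p) (N + 1) p).foldl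
    (fun a c => a.setIfInBounds c.toNat false) arr

-- outer 'while p * p <= N: … ; p += 1' with fuel (the loop runs at most √N ≤ fuel times)
def sieveLoop : Nat → Int → Int → Array Bool → Array Bool
  | 0, _, _, arr => arr
  | fuel + 1, N, p, arr =>
      if p * p ≤ N then sieveLoop fuel N (p + 1) (markMultiples N p arr)
      else arr

-- 's, x = 0, i; while x: s += x % 10; x //= 10' with fuel (x shrinks every step)
def digSumB : Nat → Int → Int → Int
  | 0, s, _ => s
  | fuel + 1, s, x =>
      if x == 0 then s else digSumB fuel (s + PySem.Int.mod x 10) (PySem.Int.floordiv x 10)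

def trau_alt (n : Int) (m : Int) : List Int :=
  if n < 10 then []
  else
    let sieve := sieveLoop (n.toNat + 1) n 2 (Array.replicate (n + 1).toNat true)
    (PySem.List.pyRange 10 (n + 1) 1).foldl
      (fun out i =>
        if sieve.getD i.toNat false then
          if digSumB (i.toNat + 1) 0 i == m then out ++ [i] else out
        else out) []

-- ===== PRECONDITION & SPEC =====
def Spec_trau (n : Int) (m : Int) (out : List Int) : Prop := out = trau_alt n m
instance (n : Int) (m : Int) (out : List Int) : Decidable (Spec_trau n m out) := by unfold Spec_trau; infer_instance

-- ===== CLAIM (what is proved, stated in full; the proofs are below) =====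
def Claim_equal_trau : Prop := ∀ (n : Int) (m : Int), Dom_trau n m → Spec_trau n m (trau n m)

-- ===== LEMMAS AND PROOFS =====

-- digit sum of a natural number: the common value of both digit-sum computations
def dsum (v : Nat) : Int :=
  if v = 0 then 0 else (v % 10 : Int) + dsum (v / 10)
decreasing_by exact Nat.div_lt_self (by omega) (by omega)

lemma digitChar_val {r : Nat} (hr : r < 10) :
    ((Nat.digitChar r).toNat : Int) - 48 = (r : Int) := by
  interval_cases r <;> decide

lemma toDigitsCore_acc (f : Nat) : ∀ (v : Nat) (acc : List Char),
    Nat.toDigitsCore 10 f v acc = Nat.toDigitsCore 10 f v [] ++ acc := by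
  induction f with
  | zero => intro v acc; simp [Nat.toDigitsCore]
  | succ f ih =>
      intro v acc
      simp only [Nat.toDigitsCore]
      by_cases h : v / 10 = 0
      · simp [h]
      · simp only [h, if_false]
        rw [ih (v / 10) [Nat.digitChar (v % 10)], ih (v / 10) (Nat.digitChar (v % 10) :: acc)]
        simp

lemma toDigitsCore_sum (f : Nat) : ∀ (v : Nat), v < f →
    ((Nat.toDigitsCore 10 f v []).map (fun c => ((c.toNat : Int) - 48))).sum = dsum v := by
  induction f with
  | zero => intro v hv; omega
  | succ f ih =>
      intro v hv
      simp only [Nat.toDigitsCore]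
      by_cases h : v / 10 = 0
      · have hv10 : v < 10 := by omega
        simp [h, digitChar_val (show v % 10 < 10 by omega)]
        rw [dsum]
        by_cases hv0 : v = 0
        · simp [hv0]
        · rw [if_neg hv0, h, dsum]
          simp
      · rw [if_neg h, toDigitsCore_acc]
        simp only [List.map_append, List.sum_append]
        rw [ih (v / 10) (by omega)]
        simp [digitChar_val (show v % 10 < 10 by omega)]
        conv_rhs => rw [dsum]
        rw [if_neg (show ¬ v = 0 by omega)]
        ring

lemma digSumA_eq_dsum (k : Int) (hk : 0 ≤ k) : digSumA k = dsum k.toNat := by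
  unfold digSumA PySem.Int.toChars
  rw [if_neg (by omega)]
  exact toDigitsCore_sum (k.toNat + 1) k.toNat (by omega)

lemma digSumB_eq_dsum (fuel : Nat) : ∀ (s x : Int), 0 ≤ x → x.toNat < fuel →
    digSumB fuel s x = s + dsum x.toNat := by
  induction fuel with
  | zero => intro s x _ h; omega
  | succ fuel ih =>
      intro fs x hx hf
      by_cases h0 : x = 0
      · simp [digSumB, h0, dsum]
      · rw [digSumB, if_neg (by simpa using h0)]
        have hx' : x = ((x.toNat : Nat) : Int) := by omega
        have h10 : ((10 : Nat) : Int) = (10 : Int) := by norm_num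
        rw [hx', ← h10, PySem.Int.mod_natCast, PySem.Int.floordiv_natCast]
        rw [ih _ _ (by positivity) (by omega)]
        simp only [Int.toNat_natCast]
        conv_rhs => rw [dsum]
        rw [if_neg (show ¬ x.toNat = 0 by omega)]
        push_cast
        ring

-- the common "has a small divisor" condition
def Comp (k : Int) : Prop := ∃ q : Int, 2 ≤ q ∧ q * q ≤ k ∧ q ∣ k

lemma ntA_true_iff (k : Int) (hk : 2 ≤ k) : ntA k = true ↔ ¬ Comp k := by
  unfold ntA Comp
  rw [if_neg (by omega), List.all_eq_true]
  have hmem : ∀ q : Int,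
      q ∈ PySem.List.pyRange 2 ((Nat.sqrt k.toNat : Int) + 1) 1 ↔ (2 ≤ q ∧ q * q ≤ k) := by
    intro q
    rw [PySem.List.mem_pyRange_one]
    constructor
    · rintro ⟨h2, hlt⟩
      refine ⟨h2, ?_⟩
      have h1 : q.toNat ≤ Nat.sqrt k.toNat := by omega
      have h2' : q.toNat * q.toNat ≤ k.toNat := Nat.le_sqrt.mp h1
      have hq : q = ((q.toNat : Nat) : Int) := by omega
      have hkk : k = ((k.toNat : Nat) : Int) := by omega
      rw [hq, hkk]; exact_mod_cast h2'
    · rintro ⟨h2, hqq⟩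
      refine ⟨h2, ?_⟩
      have hq : q = ((q.toNat : Nat) : Int) := by omega
      have hkk : k = ((k.toNat : Nat) : Int) := by omega
      have h2' : q.toNat * q.toNat ≤ k.toNat := by
        rw [hq, hkk] at hqq; exact_mod_cast hqq
      have := Nat.le_sqrt.mpr h2'
      omega
  constructor
  · intro hall
    rintro ⟨q, hq2, hqq, hdvd⟩
    have := hall q ((hmem q).mpr ⟨hq2, hqq⟩)
    rw [Bool.not_eq_true', beq_eq_false_iff_ne] at this
    exact this ((PySem.Int.mod_eq_zero_iff_dvd k q).mpr hdvd)
  · intro hno q hq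
    rw [hmem q] at hq
    rw [Bool.not_eq_true', beq_eq_false_iff_ne]
    intro hz
    exact hno ⟨q, hq.1, hq.2, (PySem.Int.mod_eq_zero_iff_dvd k q).mp hz⟩

lemma setD_ne (a : Array Bool) (i j : Nat) (d : Bool) (h : i ≠ j) :
    (a.setIfInBounds i false).getD j d = a.getD j d := by
  rw [Array.getD_eq_getD_getElem?, Array.getD_eq_getD_getElem?, Array.getElem?_setIfInBounds]
  simp [h]

lemma setD_self (a : Array Bool) (i : Nat) : (a.setIfInBounds i false).getD i false = false := by
  rw [Array.getD_eq_getD_getElem?, Array.getElem?_setIfInBounds]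
  by_cases h : i < a.size <;> simp [h]

lemma foldl_set_false_getD (L : List Int) (arr : Array Bool) (j : Nat)
    (hL : ∀ c ∈ L, 0 ≤ c) :
    (L.foldl (fun a c => a.setIfInBounds c.toNat false) arr).getD j false =
      (arr.getD j false && !(L.any (fun c => c == (j : Int)))) := by
  induction L generalizing arr with
  | nil => simp
  | cons c L ih =>
      have hc : 0 ≤ c := hL c (by simp)
      rw [List.foldl_cons, ih _ (fun x hx => hL x (by simp [hx]))]
      by_cases hcj : c = (j : Int)
      · have : c.toNat = j := by omega
        rw [this, setD_self]
        simp [hcj]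
      · have hne : c.toNat ≠ j := by omega
        have hb : (c == (j : Int)) = false := by simpa using hcj
        rw [setD_ne _ _ _ _ hne]
        simp [hb]

lemma mark_getD (N p : Int) (arr : Array Bool) (j : Nat) (hp : 0 < p) :
    ((markMultiples N p arr).getD j false = true ↔
      (arr.getD j false = true ∧ ¬ (p * p ≤ (j : Int) ∧ (j : Int) ≤ N ∧ p ∣ (j : Int)))) := by
  have hdd : ∀ x : Int, (p ∣ x - p * p ↔ p ∣ x) := by
    intro x
    constructor
    · intro hsub
      have := dvd_add hsub (⟨p, rfl⟩ : p ∣ p * p)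
      simpa using this
    · intro hx
      exact dvd_sub hx ⟨p, rfl⟩
  unfold markMultiples
  rw [foldl_set_false_getD _ _ _ (fun c hc => by
    rw [PySem.List.mem_pyRange_iff_of_pos hp] at hc
    nlinarith [hc.1])]
  rw [Bool.and_eq_true, Bool.not_eq_true', List.any_eq_false]
  constructor
  · rintro ⟨h1, h2⟩
    refine ⟨h1, ?_⟩
    rintro ⟨ha, hb, hd⟩
    have hj : (j : Int) ∈ PySem.List.pyRange (p * p) (N + 1) p := by
      rw [PySem.List.mem_pyRange_iff_of_pos hp]
      exact ⟨ha, by omega, (hdd _).mpr hd⟩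
    have := h2 _ hj
    simp at this
  · rintro ⟨h1, h2⟩
    refine ⟨h1, ?_⟩
    intro c hc hcj
    rw [beq_iff_eq] at hcj
    subst hcj
    rw [PySem.List.mem_pyRange_iff_of_pos hp] at hc
    exact h2 ⟨hc.1, by omega, (hdd _).mp hc.2.2⟩

lemma sieveLoop_getD (fuel : Nat) : ∀ (N p : Int) (arr : Array Bool), 2 ≤ p →
    N < (p + fuel) * (p + fuel) → ∀ j : Nat,
    ((sieveLoop fuel N p arr).getD j false = true ↔
      (arr.getD j false = true ∧
        ¬ ∃ q : Int, p ≤ q ∧ q * q ≤ N ∧ q * q ≤ (j : Int) ∧ (j : Int) ≤ N ∧ q ∣ (j : Int))) := by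
  induction fuel with
  | zero =>
      intro N p arr hp hN j
      simp only [sieveLoop]
      constructor
      · intro h
        refine ⟨h, ?_⟩
        rintro ⟨q, hq, hqq, _, _, _⟩
        push_cast at hN
        nlinarith
      · exact fun h => h.1
  | succ fuel ih =>
      intro N p arr hp hN j
      simp only [sieveLoop]
      by_cases hpp : p * p ≤ N
      · rw [if_pos hpp]
        have hN' : N < (p + 1 + (fuel : Int)) * (p + 1 + (fuel : Int)) := by
          push_cast at hN; nlinarith
        rw [ih N (p + 1) _ (by omega) hN' j, mark_getD N p arr j (by omega)]
        constructor
        · rintro ⟨⟨h1, h2⟩, h3⟩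
          refine ⟨h1, ?_⟩
          rintro ⟨q, hq, hqN, hqj, hjN, hd⟩
          rcases eq_or_lt_of_le hq with rfl | hlt
          · exact h2 ⟨hqj, hjN, hd⟩
          · exact h3 ⟨q, by omega, hqN, hqj, hjN, hd⟩
        · rintro ⟨h1, h2⟩
          refine ⟨⟨h1, ?_⟩, ?_⟩
          · rintro ⟨ha, hb, hd⟩
            exact h2 ⟨p, le_refl p, hpp, ha, hb, hd⟩
          · rintro ⟨q, hq, hqN, hqj, hjN, hd⟩
            exact h2 ⟨q, by omega, hqN, hqj, hjN, hd⟩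
      · rw [if_neg hpp]
        constructor
        · intro h
          refine ⟨h, ?_⟩
          rintro ⟨q, hq, hqN, _, _, _⟩
          nlinarith
        · exact fun h => h.1

lemma repl_getD (s i : Nat) (h : i < s) : (Array.replicate s true).getD i false = true := by
  simp [Array.getD, h]

-- ===== VERDICT (by name: the statement is the Claim_ definition above) =====
theorem trau_spec : Claim_equal_trau := by
  intro n m _
  unfold Spec_trau trau trau_alt
  by_cases hn : n < 10
  · rw [if_pos hn, PySem.List.pyRange_one_eq_nil (by omega)]
    rfl
  · rw [if_neg hn]
    simp only []
    apply PySem.List.foldl_congr_mem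
    intro acc i hi
    rw [PySem.List.mem_pyRange_one] at hi
    obtain ⟨hi10, hin⟩ := hi
    have hcast : ((i.toNat : Nat) : Int) = i := by omega
    have hdig : digSumB (i.toNat + 1) 0 i = digSumA i := by
      rw [digSumB_eq_dsum _ 0 i (by omega) (by omega), digSumA_eq_dsum i (by omega)]
      ring
    have hsv : (sieveLoop (n.toNat + 1) n 2 (Array.replicate (n + 1).toNat true)).getD i.toNat false
        = ntA i := by
      have hfuel : n < ((2 : Int) + ((n.toNat + 1 : Nat) : Int)) * (2 + ((n.toNat + 1 : Nat) : Int)) := by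
        push_cast
        nlinarith [Int.toNat_of_nonneg (show (0 : Int) ≤ n by omega)]
      have hchar := sieveLoop_getD (n.toNat + 1) n 2 (Array.replicate (n + 1).toNat true)
        (le_refl 2) hfuel i.toNat
      rw [hcast, repl_getD _ _ (by omega)] at hchar
      have hiff : ((sieveLoop (n.toNat + 1) n 2 (Array.replicate (n + 1).toNat true)).getD i.toNat false = true)
          ↔ (ntA i = true) := by
        rw [hchar, ntA_true_iff i (by omega)]
        constructor
        · rintro ⟨_, hno⟩
          rintro ⟨q, hq2, hqq, hd⟩
          exact hno ⟨q, hq2, le_trans hqq (by omega), hqq, by omega, hd⟩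
        · intro hno
          refine ⟨rfl, ?_⟩
          rintro ⟨q, hq2, _, hqj, _, hd⟩
          exact hno ⟨q, hq2, hqj, hd⟩
      exact Bool.eq_iff_iff.mpr hiff
    rw [hsv, hdig]
    cases ntA i <;> simp
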